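-- pv_equiv track=rewrite | github.com/AlxndrJhn/adventofcode2024 | 09/day.py | split_intervals
-- ===== SOURCE A (Python) =====
-- def split_intervals(data):
--     file_intervals, free_intervals = [], []
--     file_id = 0
--     idx_buffer = 0
--     for i, x in enumerate(data):
--         is_file = i % 2 == 0
--         if is_file:
--             file_intervals.append(
--                 (
--                     idx_buffer,
--                     x,
--                 )
--             )
--             file_id += 1
--         else:
--             free_intervals.append(
--                 (
--                     idx_buffer,
--                     x,
--                 )
--             )
--         idx_buffer += x
--     return file_intervals, free_intervals
-- ===== SOURCE B (Python) =====
-- def split_intervals(data):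
--     # consume the data one (file, free) pair at a time from an iterator:
--     # no enumerate, no parity test, no file-id counter
--     files, frees = [], []
--     off = 0
--     it = iter(data)
--     for a in it:
--         files.append((off, a))
--         b = next(it, None)
--         if b is None:
--             break
--         frees.append((off + a, b))
--         off += a + b
--     return files, frees
-- ===== Notes on version B (the rewrite author's own statement) =====
-- stated objective: alternative
-- what changed: Replaces A's enumerate loop with parity test and file_id counter by a loop that consumes one (file, free) pair of elements per step from an iterator, so the parity branch and the index/counter bookkeeping disappear.
import Mathlib
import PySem

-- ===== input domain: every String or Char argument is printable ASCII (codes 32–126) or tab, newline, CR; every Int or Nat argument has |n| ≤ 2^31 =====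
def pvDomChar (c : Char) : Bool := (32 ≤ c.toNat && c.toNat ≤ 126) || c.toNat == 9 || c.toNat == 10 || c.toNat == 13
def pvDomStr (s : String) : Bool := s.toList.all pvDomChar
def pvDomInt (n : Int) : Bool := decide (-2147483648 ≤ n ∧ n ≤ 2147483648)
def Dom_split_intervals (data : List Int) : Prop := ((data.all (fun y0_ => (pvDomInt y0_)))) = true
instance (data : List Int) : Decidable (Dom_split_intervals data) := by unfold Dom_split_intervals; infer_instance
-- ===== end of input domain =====

-- B replaces A's enumerate loop with parity test and four-part accumulator by a
-- recursion consuming one (file, free) pair of elements per step (objective: alternative).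

-- ===== PORT A =====
-- literal port of A's loop: fold over enumerate(data) carrying (file_intervals, free_intervals, file_id, idx_buffer)
def split_intervals (data : List Int) : (List (Int × Int)) × (List (Int × Int)) :=
  let s := (PySem.List.enumerate data 0).foldl
    (fun (st : (List (Int × Int)) × (List (Int × Int)) × Int × Int) (p : Int × Int) =>
      if PySem.Int.mod p.1 2 == 0 then
        (st.1 ++ [(st.2.2.2, p.2)], st.2.1, st.2.2.1 + 1, st.2.2.2 + p.2)
      else
        (st.1, st.2.1 ++ [(st.2.2.2, p.2)], st.2.2.1, st.2.2.2 + p.2))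
    ([], [], 0, 0)
  (s.1, s.2.1)

-- ===== PORT B =====
-- Source B's loop: take a from the iterator, append a file interval, try to take b
-- (next(it, None) = none exactly when the remaining list is empty), append the
-- free interval and advance the offset; state is (files, frees, off)
def altLoop : List Int → List (Int × Int) → List (Int × Int) → Int →
    (List (Int × Int)) × (List (Int × Int))
  | [], files, frees, _ => (files, frees)
  | [a], files, frees, off => (files ++ [(off, a)], frees)
  | a :: b :: rest, files, frees, off =>
      altLoop rest (files ++ [(off, a)]) (frees ++ [(off + a, b)]) (off + a + b)

def split_intervals_alt (data : List Int) : (List (Int × Int)) × (List (Int × Int)) :=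
  altLoop data [] [] 0

-- ===== PRECONDITION & SPEC =====
def Spec_split_intervals (data : List Int) (out : (List (Int × Int)) × (List (Int × Int))) : Prop := out = split_intervals_alt data
instance (data : List Int) (out : (List (Int × Int)) × (List (Int × Int))) : Decidable (Spec_split_intervals data out) := by unfold Spec_split_intervals; infer_instance

-- ===== CLAIM (what is proved, stated in full; the proofs are below) =====
def Claim_equal_split_intervals : Prop := ∀ (data : List Int), Dom_split_intervals data → Spec_split_intervals data (split_intervals data)

-- ===== LEMMAS AND PROOFS =====

-- recursive characterisation both ports are related to
def split_go : List Int → Int → (List (Int × Int)) × (List (Int × Int))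
  | [], _ => ([], [])
  | [a], off => ([(off, a)], [])
  | a :: b :: rest, off =>
      let p := split_go rest (off + a + b)
      ((off, a) :: p.1, (off + a, b) :: p.2)

theorem altLoop_eq : ∀ (data : List Int) (F G : List (Int × Int)) (off : Int),
    altLoop data F G off = (F ++ (split_go data off).1, G ++ (split_go data off).2)
  | [], F, G, off => by simp [altLoop, split_go]
  | [a], F, G, off => by simp [altLoop, split_go]
  | a :: b :: rest, F, G, off => by
      rw [altLoop, altLoop_eq rest]
      simp [split_go]

-- number of file intervals produced (loop-invariant bookkeeping for A's file_id)
def pvFc : List Int → Int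
  | [] => 0
  | [_] => 1
  | _ :: _ :: rest => 1 + pvFc rest

def pvStep (st : (List (Int × Int)) × (List (Int × Int)) × Int × Int) (p : Int × Int) :
    (List (Int × Int)) × (List (Int × Int)) × Int × Int :=
  if PySem.Int.mod p.1 2 == 0 then
    (st.1 ++ [(st.2.2.2, p.2)], st.2.1, st.2.2.1 + 1, st.2.2.2 + p.2)
  else
    (st.1, st.2.1 ++ [(st.2.2.2, p.2)], st.2.2.1, st.2.2.2 + p.2)

theorem pv_mod_even (m : Nat) : PySem.Int.mod (2 * (m : Int)) 2 = 0 := by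
  rw [PySem.Int.mod_eq_emod_of_pos (by omega : (0:Int) < 2)]; omega

theorem pv_mod_odd (m : Nat) : PySem.Int.mod (2 * (m : Int) + 1) 2 = 1 := by
  rw [PySem.Int.mod_eq_emod_of_pos (by omega : (0:Int) < 2)]; omega

theorem pv_loop_eq : ∀ (data : List Int) (m : Nat) (F G : List (Int × Int)) (fid off : Int),
    (PySem.List.enumerate data (2 * (m : Int))).foldl pvStep (F, G, fid, off) =
      (F ++ (split_go data off).1, G ++ (split_go data off).2, fid + pvFc data, off + data.sum)
  | [], m, F, G, fid, off => by
      simp [PySem.List.enumerate, split_go, pvFc]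
  | [a], m, F, G, fid, off => by
      simp [PySem.List.enumerate, split_go, pvFc, pvStep]
  | a :: b :: rest, m, F, G, fid, off => by
      have ih := pv_loop_eq rest (m + 1) (F ++ [(off, a)]) (G ++ [(off + a, b)])
        (fid + 1) (off + a + b)
      have h2 : (2 * ((m : Int)) + 1 + 1) = 2 * ((m + 1 : Nat) : Int) := by push_cast; ring
      simp only [PySem.List.enumerate_cons, List.foldl_cons, pvStep, pv_mod_even m,
        pv_mod_odd m, h2] at *
      simp only [beq_self_eq_true, if_true, beq_iff_eq, one_ne_zero, if_false] at *
      rw [ih]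
      simp [split_go, pvFc, List.sum_cons]
      omega

theorem split_intervals_eq (data : List Int) : split_intervals data = split_intervals_alt data := by
  have h := pv_loop_eq data 0 [] [] 0 0
  simp only [Nat.cast_zero, mul_zero] at h
  simp only [split_intervals, split_intervals_alt]
  change (let s := (PySem.List.enumerate data 0).foldl pvStep ([], [], 0, 0); (s.1, s.2.1)) = _
  rw [h, altLoop_eq]

-- ===== VERDICT (by name: the statement is the Claim_ definition above) =====
theorem split_intervals_spec : Claim_equal_split_intervals := by
  intro data _
  unfold Spec_split_intervals
  exact split_intervals_eq data
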